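-- pv_equiv track=rewrite | github.com/JavonLoong/wechat-capture | wechat_capture/database.py | find_contact
-- ===== SOURCE A (Python) =====
-- def find_contact(query, contacts):
--     """Fuzzy search contacts, returns (username, display_name) or None"""
--     q = query.lower()
--     # Exact match
--     for uname, display in contacts.items():
--         if q == display.lower() or q == uname.lower():
--             return uname, display
--     # Fuzzy match
--     for uname, display in contacts.items():
--         if q in display.lower() or q in uname.lower():
--             return uname, display
--     return None
-- ===== SOURCE B (Python) =====
-- def find_contact(query, contacts):
--     """Fuzzy search contacts, returns (username, display_name) or None"""
--     q = query.lower()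
--     fuzzy = None
--     for uname, display in contacts.items():
--         dl = display.lower()
--         ul = uname.lower()
--         if q == dl or q == ul:
--             return uname, display
--         if fuzzy is None and (q in dl or q in ul):
--             fuzzy = (uname, display)
--     return fuzzy
-- ===== Notes on version B (the rewrite author's own statement) =====
-- stated objective: alternative
-- what changed: Replaced A's two sequential scans (exact pass, then fuzzy pass) by one single pass that returns an exact hit immediately and remembers the first fuzzy hit in an accumulator, lowercasing each entry once per element.
import Mathlib
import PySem

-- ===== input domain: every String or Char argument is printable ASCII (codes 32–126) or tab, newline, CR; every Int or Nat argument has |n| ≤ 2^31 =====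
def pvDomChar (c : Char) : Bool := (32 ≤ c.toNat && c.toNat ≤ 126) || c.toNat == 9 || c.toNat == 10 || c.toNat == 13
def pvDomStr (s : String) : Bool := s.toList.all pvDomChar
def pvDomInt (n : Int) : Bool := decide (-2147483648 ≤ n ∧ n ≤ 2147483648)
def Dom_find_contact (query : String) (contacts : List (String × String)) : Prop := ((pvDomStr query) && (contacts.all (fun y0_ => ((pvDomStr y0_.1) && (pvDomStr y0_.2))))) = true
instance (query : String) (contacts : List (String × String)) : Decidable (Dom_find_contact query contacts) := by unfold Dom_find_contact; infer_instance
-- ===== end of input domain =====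

-- B replaces A's two sequential scans by one single pass that returns exact hits
-- immediately and remembers the first fuzzy hit in an accumulator (alternative decomposition).


-- ===== PORT A =====
-- A: first loop = first exact match; second loop = first fuzzy (substring) match.
def find_contact (query : String) (contacts : List (String × String)) : Option (String × String) :=
  let q := PySem.Str.lower query
  match contacts.find? (fun p => q == PySem.Str.lower p.2 || q == PySem.Str.lower p.1) with
  | some p => some p
  | none =>
      contacts.find? (fun p =>
        PySem.Str.isIn q (PySem.Str.lower p.2) || PySem.Str.isIn q (PySem.Str.lower p.1))

-- ===== PORT B =====
-- B: one pass; `fuzzy` holds the first substring hit seen so far.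
def find_contact_loop (q : String) : List (String × String) → Option (String × String) → Option (String × String)
  | [], fuzzy => fuzzy
  | (uname, display) :: rest, fuzzy =>
      let dl := PySem.Str.lower display
      let ul := PySem.Str.lower uname
      if q == dl || q == ul then some (uname, display)
      else
        let fuzzy' :=
          if fuzzy.isNone && (PySem.Str.isIn q dl || PySem.Str.isIn q ul) then
            some (uname, display)
          else fuzzy
        find_contact_loop q rest fuzzy'

def find_contact_alt (query : String) (contacts : List (String × String)) : Option (String × String) :=
  find_contact_loop (PySem.Str.lower query) contacts none

-- ===== PRECONDITION & SPEC =====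
def Spec_find_contact (query : String) (contacts : List (String × String)) (out : Option (String × String)) : Prop := out = find_contact_alt query contacts
instance (query : String) (contacts : List (String × String)) (out : Option (String × String)) : Decidable (Spec_find_contact query contacts out) := by unfold Spec_find_contact; infer_instance

-- ===== CLAIM (what is proved, stated in full; the proofs are below) =====
def Claim_equal_find_contact : Prop := ∀ (query : String) (contacts : List (String × String)), Dom_find_contact query contacts → Spec_find_contact query contacts (find_contact query contacts)

-- ===== LEMMAS AND PROOFS =====

-- predicates of A's two loops
def exactP (q : String) (p : String × String) : Bool :=
  q == PySem.Str.lower p.2 || q == PySem.Str.lower p.1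
def fuzzyP (q : String) (p : String × String) : Bool :=
  PySem.Str.isIn q (PySem.Str.lower p.2) || PySem.Str.isIn q (PySem.Str.lower p.1)

-- with a fuzzy candidate already stored, B only looks for an exact hit
lemma loop_some (q : String) (cs : List (String × String)) (f : String × String) :
    find_contact_loop q cs (some f) =
      match cs.find? (exactP q) with
      | some p => some p
      | none => some f := by
  induction cs with
  | nil => rfl
  | cons hd tl ih =>
    obtain ⟨u, d⟩ := hd
    by_cases h : (q == PySem.Str.lower d || q == PySem.Str.lower u) = true
    · simp [find_contact_loop, h, List.find?, exactP]
    · simp only [Bool.not_eq_true] at h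
      simp [find_contact_loop, h, List.find?, exactP, ih]

lemma loop_none (q : String) (cs : List (String × String)) :
    find_contact_loop q cs none =
      match cs.find? (exactP q) with
      | some p => some p
      | none => cs.find? (fuzzyP q) := by
  induction cs with
  | nil => rfl
  | cons hd tl ih =>
    obtain ⟨u, d⟩ := hd
    by_cases he : (q == PySem.Str.lower d || q == PySem.Str.lower u) = true
    · simp [find_contact_loop, he, List.find?, exactP]
    · simp only [Bool.not_eq_true] at he
      cases hd : PySem.Chars.isIn q.toList (PySem.Chars.lower d.toList) <;>
        cases hu : PySem.Chars.isIn q.toList (PySem.Chars.lower u.toList) <;>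
        simp [find_contact_loop, he, hd, hu, List.find?, exactP, fuzzyP, loop_some, ih]

-- ===== VERDICT (by name: the statement is the Claim_ definition above) =====
theorem find_contact_spec : Claim_equal_find_contact := by
  intro query contacts _
  unfold Spec_find_contact find_contact find_contact_alt
  rw [loop_none]
  rfl
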